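-- pv_equiv track=rewrite | github.com/nesar/paper_quality_filter | enhanced_paper_analyser.py | _separate_problem_solution
-- ===== SOURCE A (Python) =====
-- from typing import Dict, List, Any, Optional, Tuple
--
-- def _separate_problem_solution(steps: List[str]) -> Tuple[str, List[str]]:
--     """Separate problem statement from solution steps"""
--     if not steps:
--         return "Problem statement not clearly identified.", []
--
--     problem_indicators = ["given", "find", "calculate", "determine", "show", "prove", "consider", "let"]
--     solution_indicators = ["solution", "answer", "we start", "beginning", "first step", "step 1"]
--
--     problem_parts = []
--     solution_parts = []
--
--     in_solution = False
--     for i, step in enumerate(steps):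
--         step_lower = step.lower()
--
--         if not in_solution and any(indicator in step_lower for indicator in solution_indicators):
--             in_solution = True
--
--         if i < 2 and not in_solution:
--             if any(indicator in step_lower for indicator in problem_indicators):
--                 problem_parts.append(step)
--                 continue
--
--         if in_solution or i >= 2:
--             solution_parts.append(step)
--         else:
--             problem_parts.append(step)
--
--     if problem_parts:
--         problem = " ".join(problem_parts)
--     else:
--         problem = "Derivation or proof:"
--
--     if not solution_parts and steps:
--         solution_parts = steps
--         problem = "Problem statement not clearly identified."
--
--     return problem, solution_parts
-- ===== SOURCE B (Python) =====
-- def _separate_problem_solution(steps):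
--     """Separate problem statement from solution steps (slice at a computed split index)"""
--     if not steps:
--         return "Problem statement not clearly identified.", []
--
--     solution_indicators = ["solution", "answer", "we start", "beginning", "first step", "step 1"]
--
--     k = next((i for i, s in enumerate(steps)
--               if any(t in s.lower() for t in solution_indicators)), len(steps))
--     k = min(k, 2)
--
--     problem_parts, solution_parts = steps[:k], steps[k:]
--     problem = " ".join(problem_parts) if problem_parts else "Derivation or proof:"
--
--     if not solution_parts:
--         return "Problem statement not clearly identified.", steps
--     return problem, solution_parts
-- ===== Notes on version B (the rewrite author's own statement) =====
-- stated objective: simpler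
-- what changed: Replaces A's stateful per-step loop (in_solution flag, dead problem_indicators branch, dual accumulators) by computing one split index k = min(first step containing a solution indicator, 2) and slicing steps[:k]/steps[k:].
import Mathlib
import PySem

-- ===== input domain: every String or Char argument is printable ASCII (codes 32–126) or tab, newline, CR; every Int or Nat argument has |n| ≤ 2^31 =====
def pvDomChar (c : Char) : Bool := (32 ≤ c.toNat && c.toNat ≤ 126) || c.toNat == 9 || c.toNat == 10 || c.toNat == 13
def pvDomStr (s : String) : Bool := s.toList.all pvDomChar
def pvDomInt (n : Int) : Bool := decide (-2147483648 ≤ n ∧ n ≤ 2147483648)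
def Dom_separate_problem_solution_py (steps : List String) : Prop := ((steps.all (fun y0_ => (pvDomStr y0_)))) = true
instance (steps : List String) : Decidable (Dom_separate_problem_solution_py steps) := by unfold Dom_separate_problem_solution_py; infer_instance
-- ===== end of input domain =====

-- B replaces A's stateful per-step flag loop by computing one split index and slicing; objective: simpler.

-- ===== PORT A =====
def pvProblemIndicators : List String := ["given", "find", "calculate", "determine", "show", "prove", "consider", "let"]
def pvSolutionIndicators : List String := ["solution", "answer", "we start", "beginning", "first step", "step 1"]

-- loop body of A's 'for i, step in enumerate(steps)' (the 'continue' is modelled by duplicating the trailing if)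
def pvABody (st : List String × List String × Bool) (p : Int × String) : List String × List String × Bool :=
  let stepLower := PySem.Str.lower p.2
  let inSol := st.2.2 || pvSolutionIndicators.any (fun ind => PySem.Str.isIn ind stepLower)
  if p.1 < 2 && !inSol then
    (if pvProblemIndicators.any (fun ind => PySem.Str.isIn ind stepLower) then
      (st.1 ++ [p.2], st.2.1, inSol)
    else if inSol || decide (2 ≤ p.1) then (st.1, st.2.1 ++ [p.2], inSol)
    else (st.1 ++ [p.2], st.2.1, inSol))
  else if inSol || decide (2 ≤ p.1) then (st.1, st.2.1 ++ [p.2], inSol)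
  else (st.1 ++ [p.2], st.2.1, inSol)

def separate_problem_solution_py (steps : List String) : String × List String :=
  if steps = [] then ("Problem statement not clearly identified.", [])
  else
    let r := (PySem.List.enumerate steps 0).foldl pvABody ([], [], false)
    let problem := if r.1 ≠ [] then PySem.Str.join " " r.1 else "Derivation or proof:"
    if r.2.1 = [] ∧ steps ≠ [] then ("Problem statement not clearly identified.", steps)
    else (problem, r.2.1)

-- ===== PORT B =====
def pvHasSolB (s : String) : Bool :=
  ["solution", "answer", "we start", "beginning", "first step", "step 1"].any
    (fun t => PySem.Str.isIn t (PySem.Str.lower s))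

-- next((i for i, s in enumerate(steps) if …), len(steps))
def pvSolIdx : List String → Nat
  | [] => 0
  | s :: t => if pvHasSolB s then 0 else pvSolIdx t + 1

def separate_problem_solution_py_alt (steps : List String) : String × List String :=
  if steps = [] then ("Problem statement not clearly identified.", [])
  else
    let k := min (pvSolIdx steps) 2
    let problem_parts := steps.take k
    let solution_parts := steps.drop k
    let problem := if problem_parts ≠ [] then PySem.Str.join " " problem_parts else "Derivation or proof:"
    if solution_parts = [] then ("Problem statement not clearly identified.", steps)
    else (problem, solution_parts)

-- ===== PRECONDITION & SPEC =====
def Spec_separate_problem_solution_py (steps : List String) (out : String × List String) : Prop := out = separate_problem_solution_py_alt steps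
instance (steps : List String) (out : String × List String) : Decidable (Spec_separate_problem_solution_py steps out) := by unfold Spec_separate_problem_solution_py; infer_instance

-- ===== CLAIM =====
def Claim_equal_separate_problem_solution_py : Prop := ∀ (steps : List String), Dom_separate_problem_solution_py steps → Spec_separate_problem_solution_py steps (separate_problem_solution_py steps)


-- ===== LEMMAS AND PROOFS =====
-- the solution-indicator scan in A's body is B's pvHasSolB
lemma pvAnySol_eq (s : String) :
    pvSolutionIndicators.any (fun ind => PySem.Str.isIn ind (PySem.Str.lower s)) = pvHasSolB s := rfl

-- once i >= 2, every remaining step is appended to solution_parts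
lemma pvABody_tail (rest : List String) : ∀ (s : Int) (pp sp : List String) (inSol : Bool),
    2 ≤ s →
    (PySem.List.enumerate rest s).foldl pvABody (pp, sp, inSol)
      = (pp, sp ++ rest, inSol || rest.any pvHasSolB) := by
  induction rest with
  | nil => intro s pp sp inSol _; simp [PySem.List.enumerate_nil]
  | cons x t ih =>
    intro s pp sp inSol hs
    rw [PySem.List.enumerate_cons, List.foldl_cons]
    have h1 : decide (s < 2) = false := by simp; omega
    have h2 : decide (2 ≤ s) = true := by simp; omega
    simp only [pvABody, pvAnySol_eq, h1, h2, Bool.false_and, Bool.or_true, if_true, Bool.false_eq_true, if_false]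
    rw [ih (s + 1) pp (sp ++ [x]) _ (by omega)]
    simp [List.any_cons, Bool.or_assoc]

theorem separate_problem_solution_py_spec : Claim_equal_separate_problem_solution_py := by
  intro steps _
  unfold Spec_separate_problem_solution_py
  match steps with
  | [] => rfl
  | [a] =>
    cases ha : pvHasSolB a <;>
    · simp only [separate_problem_solution_py, separate_problem_solution_py_alt,
        PySem.List.enumerate_cons, PySem.List.enumerate_nil, List.foldl_cons, List.foldl_nil,
        pvABody, pvAnySol_eq, pvSolIdx, ha]
      simp
  | a :: b :: rest =>
    cases ha : pvHasSolB a <;> cases hb : pvHasSolB b <;>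
    · simp only [separate_problem_solution_py, separate_problem_solution_py_alt,
        PySem.List.enumerate_cons, List.foldl_cons, pvABody, pvAnySol_eq, pvSolIdx, ha, hb]
      rw [pvABody_tail rest (0 + 1 + 1) _ _ _ (by omega)]
      cases rest <;> simp [pvSolIdx]
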